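-- pv_equiv track=rewrite | github.com/lagillenwater/Cartoomics | find_path.py | merge_lists_on_overlap
-- ===== SOURCE A (Python) =====
-- def merge_lists_on_overlap(list1, list2):
--     """_summary_
--
--     Args:
--         list1 (list): A list of combined triples
--         list2 (list): A list of combined triples
--
--     Returns:
--         list: Merged lists based on overlapping values if the values before the overlapping values between the 2 lists don't match and the values after the overlapping values between the 2 lists don't match.
--     """
--     merged_lists = []
--
--     # Iterate through list1 and list2 to find consecutive overlapping elements
--     for i in range(len(list1) - 1):  # Loop through list1
--         for j in range(len(list2) - 1):  # Loop through list2
--             # Check for consecutive overlap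
--             if list1[i] == list2[j] and list1[i+1] == list2[j+1]:
--                 # Check if the elements before the overlap in both lists do not match
--                 if i > 0 and j > 0 and list1[i-1] == list2[j-1]:
--                     continue  # Skip if the elements before overlap match
--
--                 # Check if the elements after the overlap in both lists do not match
--                 if i + 2 < len(list1) and j + 2 < len(list2):
--                     if list1[i+2] == list2[j+2]:
--                         continue  # Skip if the elements after overlap match
--
--                 # Combine list1 before the overlap and list2 after the overlap
--                 merged_list1 = list1[:i+2] + list2[j+2:]
--                 merged_lists.append(merged_list1)
--
--     return merged_lists
-- ===== SOURCE B (Python) =====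
-- def merge_lists_on_overlap(list1, list2):
--     # Build once a hash index from each consecutive pair of list2 to the list of
--     # its start positions; then a single comprehension over list1's consecutive
--     # pairs looks each pair up directly (no inner scan of list2).
--     index = {}
--     for j, pr in enumerate(zip(list2, list2[1:])):
--         index.setdefault(pr, []).append(j)
--
--     def ok(i, j):
--         if i > 0 and j > 0 and list1[i - 1] == list2[j - 1]:
--             return False
--         if i + 2 < len(list1) and j + 2 < len(list2) and list1[i + 2] == list2[j + 2]:
--             return False
--         return True
--
--     return [list1[:i + 2] + list2[j + 2:]
--             for i, pr in enumerate(zip(list1, list1[1:]))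
--             for j in index.get(pr, [])
--             if ok(i, j)]
-- ===== Notes on version B (the rewrite author's own statement) =====
-- stated objective: alternative
-- what changed: Replaces A's nested index loops by a dict built once from list2's consecutive pairs (via enumerate/zip) to their start positions, and a single flat comprehension over list1's pairs that looks each pair up directly, so the inner scan of list2 disappears; on match-dense inputs output construction dominates, so measured time is similar.
import Mathlib
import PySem

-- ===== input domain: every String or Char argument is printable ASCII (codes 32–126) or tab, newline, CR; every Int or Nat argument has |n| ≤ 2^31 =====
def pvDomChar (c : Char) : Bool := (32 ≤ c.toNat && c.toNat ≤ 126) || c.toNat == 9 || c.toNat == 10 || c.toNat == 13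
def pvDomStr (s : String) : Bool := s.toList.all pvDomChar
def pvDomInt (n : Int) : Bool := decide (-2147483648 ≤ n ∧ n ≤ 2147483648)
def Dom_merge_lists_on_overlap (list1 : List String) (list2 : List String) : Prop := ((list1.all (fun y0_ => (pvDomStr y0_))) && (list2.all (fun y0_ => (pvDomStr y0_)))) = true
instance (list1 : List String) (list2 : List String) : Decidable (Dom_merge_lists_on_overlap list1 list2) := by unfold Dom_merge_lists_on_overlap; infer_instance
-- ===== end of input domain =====

-- B builds once a dict from list2's consecutive pairs (enumerate over zip) to their start
-- positions and emits via one flat pass over list1's pairs, so the inner scan of list2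
-- disappears (alternative algorithm; measured running time was similar on the timed inputs).

-- ===== PORT A =====
-- literal transliteration of A's nested index loops (valid indices only, so pyGetD is exact)
def merge_lists_on_overlap (list1 : List String) (list2 : List String) : List (List String) :=
  (PySem.List.pyRange 0 ((list1.length : Int) - 1) 1).foldl (fun merged i =>
    (PySem.List.pyRange 0 ((list2.length : Int) - 1) 1).foldl (fun merged j =>
      if PySem.List.pyGetD list1 i "" == PySem.List.pyGetD list2 j "" &&
         PySem.List.pyGetD list1 (i+1) "" == PySem.List.pyGetD list2 (j+1) "" then
        -- guard: elements before the overlap match → continue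
        if decide (0 < i) && decide (0 < j) &&
           (PySem.List.pyGetD list1 (i-1) "" == PySem.List.pyGetD list2 (j-1) "") then merged
        -- guard: both have an element after the overlap and they match → continue
        else if decide (i + 2 < (list1.length : Int)) && decide (j + 2 < (list2.length : Int)) &&
                (PySem.List.pyGetD list1 (i+2) "" == PySem.List.pyGetD list2 (j+2) "") then merged
        else merged ++ [PySem.List.slice list1 none (some (i+2)) ++ PySem.List.slice list2 (some (j+2)) none]
      else merged) merged) []

-- ===== PORT B =====
-- Source B's nested helper ok(i, j): early-return guards ported as nested ifs
def mergeOk (list1 : List String) (list2 : List String) (i : Int) (j : Int) : Bool :=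
  if decide (0 < i) && decide (0 < j) &&
     (PySem.List.pyGetD list1 (i-1) "" == PySem.List.pyGetD list2 (j-1) "") then false
  else if decide (i + 2 < (list1.length : Int)) && decide (j + 2 < (list2.length : Int)) &&
          (PySem.List.pyGetD list1 (i+2) "" == PySem.List.pyGetD list2 (j+2) "") then false
  else true

-- literal transliteration of Source B: the pair → positions dict via enumerate(zip(...)),
-- then one flat comprehension (flatMap) over list1's consecutive pairs
def merge_lists_on_overlap_alt (list1 : List String) (list2 : List String) : List (List String) :=
  let index : PySem.Dict (String × String) (List Int) :=
    (PySem.List.enumerate (list2.zip list2.tail) 0).foldl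
      (fun d jp => d.modify jp.2 [] (· ++ [jp.1])) PySem.Dict.empty
  (PySem.List.enumerate (list1.zip list1.tail) 0).flatMap (fun ip =>
    ((index.getD ip.2 []).filter (fun j => mergeOk list1 list2 ip.1 j)).map
      (fun j => PySem.List.slice list1 none (some (ip.1 + 2)) ++ PySem.List.slice list2 (some (j + 2)) none))

-- ===== PRECONDITION & SPEC =====
def Spec_merge_lists_on_overlap (list1 : List String) (list2 : List String) (out : List (List String)) : Prop := out = merge_lists_on_overlap_alt list1 list2
instance (list1 : List String) (list2 : List String) (out : List (List String)) : Decidable (Spec_merge_lists_on_overlap list1 list2 out) := by unfold Spec_merge_lists_on_overlap; infer_instance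

-- ===== CLAIM (what is proved, stated in full; the proofs are below) =====
def Claim_equal_merge_lists_on_overlap : Prop := ∀ (list1 : List String) (list2 : List String), Dom_merge_lists_on_overlap list1 list2 → Spec_merge_lists_on_overlap list1 list2 (merge_lists_on_overlap list1 list2)

-- ===== LEMMAS AND PROOFS =====

-- the consecutive-pair range of a list: range over the zip-with-tail length equals range over len-1
theorem pairRange_eq (l : List String) :
    PySem.List.pyRange 0 ((l.length : Int) - 1) 1
      = PySem.List.pyRange 0 (((l.zip l.tail).length : Int)) 1 := by
  cases l with
  | nil => simp [PySem.List.pyRange_one_eq_nil]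
  | cons x t => simp [List.length_zip]

-- element of zip-with-tail at a valid index is the consecutive pair
theorem zip_tail_getD (l : List String) (j : Int) (h0 : 0 ≤ j)
    (h : j < ((l.zip l.tail).length : Int)) :
    PySem.List.pyGetD (l.zip l.tail) j ("", "")
      = (PySem.List.pyGetD l j "", PySem.List.pyGetD l (j+1) "") := by
  obtain ⟨n, rfl⟩ := Int.eq_ofNat_of_zero_le h0
  have hn : n < (l.zip l.tail).length := by exact_mod_cast h
  have hn1 : n + 1 < l.length := by
    simp [List.length_zip] at hn; omega
  have : ((n : Int) + 1) = ((n + 1 : Nat) : Int) := by push_cast; ring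
  rw [this]
  simp only [PySem.List.pyGetD_natCast]
  rw [List.getD_eq_getElem _ _ hn, List.getD_eq_getElem _ _ (by omega),
      List.getD_eq_getElem _ _ hn1, List.getElem_zip, List.getElem_tail]

-- B's dict lookup returns exactly the positions of list2 whose consecutive pair equals the key
theorem index_getD (list2 : List String) (key : String × String) :
    ((PySem.List.enumerate (list2.zip list2.tail) 0).foldl
        (fun (d : PySem.Dict (String × String) (List Int)) jp => d.modify jp.2 [] (· ++ [jp.1]))
        PySem.Dict.empty).getD key []
    = ((PySem.List.enumerate (list2.zip list2.tail) 0).filter (fun jp => jp.2 == key)).map (·.1) := by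
  rw [(List.foldl_map (f := fun jp : Int × (String × String) => (jp.2, jp.1))
        (g := fun (d : PySem.Dict (String × String) (List Int)) (p : (String × String) × Int) =>
          d.modify p.1 [] (· ++ [p.2]))
        (l := PySem.List.enumerate (list2.zip list2.tail) 0) (init := PySem.Dict.empty)).symm,
      PySem.Dict.getD_foldl_modify_append, PySem.Dict.getD_empty,
      List.filter_map, List.map_map]
  simp [Function.comp_def]


-- A's inner loop over j, rewritten as filter + map (the two guards folded into mergeOk)
theorem innerA (list1 list2 : List String) (i : Int) (acc : List (List String)) :
    (PySem.List.pyRange 0 ((list2.length : Int) - 1) 1).foldl (fun merged j =>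
      if PySem.List.pyGetD list1 i "" == PySem.List.pyGetD list2 j "" &&
         PySem.List.pyGetD list1 (i+1) "" == PySem.List.pyGetD list2 (j+1) "" then
        if decide (0 < i) && decide (0 < j) &&
           (PySem.List.pyGetD list1 (i-1) "" == PySem.List.pyGetD list2 (j-1) "") then merged
        else if decide (i + 2 < (list1.length : Int)) && decide (j + 2 < (list2.length : Int)) &&
                (PySem.List.pyGetD list1 (i+2) "" == PySem.List.pyGetD list2 (j+2) "") then merged
        else merged ++ [PySem.List.slice list1 none (some (i+2)) ++ PySem.List.slice list2 (some (j+2)) none]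
      else merged) acc
    = acc ++ ((PySem.List.pyRange 0 ((list2.length : Int) - 1) 1).filter (fun j =>
        (PySem.List.pyGetD list1 i "" == PySem.List.pyGetD list2 j "" &&
         PySem.List.pyGetD list1 (i+1) "" == PySem.List.pyGetD list2 (j+1) "") && mergeOk list1 list2 i j)).map
        (fun j => PySem.List.slice list1 none (some (i+2)) ++ PySem.List.slice list2 (some (j+2)) none) := by
  rw [← PySem.List.foldl_append_if]
  apply PySem.List.foldl_congr_mem
  intro a j _
  cases h1 : (decide (0 < i) && decide (0 < j) &&
           (PySem.List.pyGetD list1 (i-1) "" == PySem.List.pyGetD list2 (j-1) "")) <;>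
    cases h2 : (decide (i + 2 < (list1.length : Int)) && decide (j + 2 < (list2.length : Int)) &&
                (PySem.List.pyGetD list1 (i+2) "" == PySem.List.pyGetD list2 (j+2) "")) <;>
    cases hm : (PySem.List.pyGetD list1 i "" == PySem.List.pyGetD list2 j "" &&
         PySem.List.pyGetD list1 (i+1) "" == PySem.List.pyGetD list2 (j+1) "") <;>
    simp [mergeOk, h1, h2]

theorem merge_lists_on_overlap_spec' (list1 list2 : List String) :
    merge_lists_on_overlap list1 list2 = merge_lists_on_overlap_alt list1 list2 := by
  simp only [merge_lists_on_overlap, merge_lists_on_overlap_alt, index_getD]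
  -- A side: nested foldls → flatMap of filter+map
  refine Eq.trans (PySem.List.foldl_congr_mem _ _ _ _ (fun acc i _ => innerA list1 list2 i acc)) ?_
  rw [PySem.List.foldl_append_eq_flatMap, List.nil_append]
  -- B side: enumerate → pyRange map, flatMap over a map
  rw [PySem.List.enumerate_eq_map_pyRange (d := ("", "")) (xs := list1.zip list1.tail),
      PySem.List.enumerate_eq_map_pyRange (d := ("", "")) (xs := list2.zip list2.tail),
      List.flatMap_map, pairRange_eq list1]
  apply List.flatMap_congr
  intro i hi
  obtain ⟨h0i, hiu⟩ := PySem.List.mem_pyRange_one.mp hi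
  simp only [PySem.List.len_eq]
  rw [zip_tail_getD list1 i h0i hiu, pairRange_eq list2, List.filter_map, List.filter_filter,
      List.filter_map, List.map_map, List.map_map]
  simp only [Function.comp_def]
  congr 1
  apply List.filter_congr
  intro j hj
  obtain ⟨h0j, hju⟩ := PySem.List.mem_pyRange_one.mp hj
  rw [zip_tail_getD list2 j h0j hju, Bool.eq_iff_iff]
  simp only [Bool.and_eq_true, beq_iff_eq, Prod.mk.injEq]
  constructor
  · rintro ⟨⟨ha, hb⟩, hok⟩; exact ⟨hok, ha.symm, hb.symm⟩
  · rintro ⟨hok, ha, hb⟩; exact ⟨⟨ha.symm, hb.symm⟩, hok⟩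


-- ===== VERDICT (by name: the statement is the Claim_ definition above) =====
theorem merge_lists_on_overlap_spec : Claim_equal_merge_lists_on_overlap := by
  intro list1 list2 _
  unfold Spec_merge_lists_on_overlap
  exact merge_lists_on_overlap_spec' list1 list2
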